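-- pv_equiv track=rewrite | github.com/hammad97/bigdatatutorial | Exercise 2/ex2.py | doc_cleaner
-- ===== SOURCE A (Python) =====
-- def doc_cleaner(docList):
--     cleanData = []
--
--     charac_with_space = '/,:;@.-?()!|"'
--     charac_without_space = '#$%&\'*+<=>[\\]^_`{}~'
--
--     for i in range(len(docList)):
--         article = docList[i]
--
--         for j in charac_with_space:
--             article = article.replace(j, ' ')
--
--         for j in charac_without_space:
--             article = article.replace(j, '')
--
--
--         article = article.lower()
--         article = article.replace('\n', ' ')
--         article = article.replace('\t', '')
--
--         article = " ".join([word for word in article.split() if word not in common_eng_wrds])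
--
--         article = " ".join([word for word in article.split() if ((len(word)>1 and (not word.isdigit())))])
--         cleanData.append(article)
--
--     return cleanData
--
-- common_eng_wrds = ({'a','able','about','across','after','all','almost','also','am','among','an',
-- 'and','any','are','as','at','be','because','been','but','by','can','cannot','could','dear','did',
-- 'do','does','either','else','ever','every','for','from','get','got','had','has','have','he','her',
-- 'hers','him','his','how','however','i','if','in','into','is','it','its','just','least','let','like',
-- 'likely','may','me','might','most','must','my','neither','no','nor','not','of','off','often','on',
-- 'only','or','other','our','own','rather','said','say','says','she','should','since','so','some',
-- 'than','that','the','their','them','then','there','these','they','this','tis','to','too','twas',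
-- 'us','wants','was','we','were','what','when','where','which','while','who','whom','why','will','with',
-- 'would','yet','you','your'})
-- ===== SOURCE B (Python) =====
-- common_eng_wrds = ({'a','able','about','across','after','all','almost','also','am','among','an',
-- 'and','any','are','as','at','be','because','been','but','by','can','cannot','could','dear','did',
-- 'do','does','either','else','ever','every','for','from','get','got','had','has','have','he','her',
-- 'hers','him','his','how','however','i','if','in','into','is','it','its','just','least','let','like',
-- 'likely','may','me','might','most','must','my','neither','no','nor','not','of','off','often','on',
-- 'only','or','other','our','own','rather','said','say','says','she','should','since','so','some',
-- 'than','that','the','their','them','then','there','these','they','this','tis','to','too','twas',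
-- 'us','wants','was','we','were','what','when','where','which','while','who','whom','why','will','with',
-- 'would','yet','you','your'})
--
-- # single-pass tokenizer: these punctuation chars end a word, these are silently dropped
-- _BREAK = set('/,:;@.-?()!|"\n')
-- _DROP = set('#$%&\'*+<=>[\\]^_`{}~\t')
--
--
-- def _keep(w):
--     return w not in common_eng_wrds and len(w) > 1 and not w.isdigit()
--
--
-- def _flush(cur, words):
--     if cur:
--         w = ''.join(cur)
--         if _keep(w):
--             words.append(w)
--
--
-- def _clean(article):
--     words = []
--     cur = []
--     for ch in article.lower():
--         if ch in _DROP: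
--             continue
--         if ch in _BREAK or ch.isspace():
--             _flush(cur, words)
--             cur = []
--         else:
--             cur.append(ch)
--     _flush(cur, words)
--     return ' '.join(words)
--
--
-- def doc_cleaner(docList):
--     return [_clean(article) for article in docList]
-- ===== Notes on version B (the rewrite author's own statement) =====
-- stated objective: alternative
-- what changed: Replaces A's 34 sequential whole-string .replace() passes followed by two split/filter/join rounds with a single-pass character-level tokenizer (a small state machine that accumulates the current word and flushes it through one fused filter at each break character).
import Mathlib
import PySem

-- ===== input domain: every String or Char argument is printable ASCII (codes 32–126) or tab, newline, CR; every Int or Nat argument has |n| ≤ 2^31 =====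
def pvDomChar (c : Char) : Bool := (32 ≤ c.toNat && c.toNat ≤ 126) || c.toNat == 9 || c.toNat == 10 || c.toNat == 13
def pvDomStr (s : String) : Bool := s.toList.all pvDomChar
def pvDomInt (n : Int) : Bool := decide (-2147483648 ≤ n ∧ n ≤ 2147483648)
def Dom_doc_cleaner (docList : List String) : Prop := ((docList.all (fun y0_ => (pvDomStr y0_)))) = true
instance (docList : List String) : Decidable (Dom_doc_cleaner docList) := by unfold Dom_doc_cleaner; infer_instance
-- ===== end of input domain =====

-- B replaces A's 34 sequential whole-string .replace() passes and two split/filter/join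
-- rounds by one single-pass character tokenizer with a fused word filter (alternative).


-- module-level constant common_eng_wrds (a Python set of strings; only membership is used)
def commonEngWrds : PySem.Set String := PySem.Set.ofList
  ["a","able","about","across","after","all","almost","also","am","among","an",
   "and","any","are","as","at","be","because","been","but","by","can","cannot","could","dear","did",
   "do","does","either","else","ever","every","for","from","get","got","had","has","have","he","her",
   "hers","him","his","how","however","i","if","in","into","is","it","its","just","least","let","like",
   "likely","may","me","might","most","must","my","neither","no","nor","not","of","off","often","on",
   "only","or","other","our","own","rather","said","say","says","she","should","since","so","some",
   "than","that","the","their","them","then","there","these","they","this","tis","to","too","twas",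
   "us","wants","was","we","were","what","when","where","which","while","who","whom","why","will","with",
   "would","yet","you","your"]

-- B's break/drop sets: _BREAK = set('/,:;@.-?()!|"\n'), _DROP = set('#$%&\'*+<=>[\\]^_`{}~\t')
def breakSet : List Char := ['/', ',', ':', ';', '@', '.', '-', '?', '(', ')', '!', '|', '"', '\n']
def dropSet : List Char := ['#', '$', '%', '&', '\'', '*', '+', '<', '=', '>', '[', '\\', ']', '^', '_', '`', '{', '}', '~', '\t']

-- the characters of the literal  '/,:;@.-?()!|"'  (iterated character by character by A)
def spaceChars : List Char := ['/', ',', ':', ';', '@', '.', '-', '?', '(', ')', '!', '|', '"']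
-- the characters of the literal  '#$%&\'*+<=>[\\]^_`{}~'
def dropChars : List Char := ['#', '$', '%', '&', '\'', '*', '+', '<', '=', '>', '[', '\\', ']', '^', '_', '`', '{', '}', '~']

-- ===== PORT A =====
def doc_cleaner (docList : List String) : List String :=
  (PySem.List.pyRange 0 (PySem.List.len docList)).foldl (fun cleanData i =>
    let article := PySem.List.pyGetD docList i ""      -- docList[i]; i ∈ range(len(docList)) is always in range
    let article := spaceChars.foldl (fun a j => PySem.Str.replace a (String.singleton j) " ") article
    let article := dropChars.foldl (fun a j => PySem.Str.replace a (String.singleton j) "") article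
    let article := PySem.Str.lower article
    let article := PySem.Str.replace article "\n" " "
    let article := PySem.Str.replace article "\t" ""
    let article := PySem.Str.join " "
      ((PySem.Str.split₀ article).filter (fun word => !(PySem.Set.contains commonEngWrds word)))
    let article := PySem.Str.join " "
      ((PySem.Str.split₀ article).filter (fun word =>
        decide (1 < PySem.Str.len word) && !PySem.Str.strIsdigit word))
    cleanData ++ [article]) []

-- ===== PORT B =====
-- B's word filter _keep: not a stopword, longer than one char, not all digits
def keepWord (w : String) : Bool :=
  !(PySem.Set.contains commonEngWrds w) && (decide (1 < PySem.Str.len w) && !PySem.Str.strIsdigit w)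

-- B's _flush: emit the accumulated word (if any) when it passes the filter
def flushWord (cur : List Char) (words : List String) : List String :=
  if cur = [] then words
  else if keepWord (String.ofList cur) then words ++ [String.ofList cur] else words

-- B's per-article loop: one pass over the (lowered) characters, accumulating the
-- current word and flushing it at every break character or whitespace
def cleanGo : List Char → List Char → List String → List String
  | [], cur, words => flushWord cur words
  | c :: rest, cur, words =>
    if c ∈ dropSet then cleanGo rest cur words
    else if c ∈ breakSet || PySem.Chars.isspace c then
      cleanGo rest [] (flushWord cur words)
    else cleanGo rest (cur ++ [c]) words

def doc_cleaner_alt (docList : List String) : List String :=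
  docList.map (fun article =>
    PySem.Str.join " " (cleanGo (PySem.Chars.lower article.toList) [] []))

-- ===== PRECONDITION & SPEC =====
def Spec_doc_cleaner (docList : List String) (out : List String) : Prop := out = doc_cleaner_alt docList
instance (docList : List String) (out : List String) : Decidable (Spec_doc_cleaner docList out) := by unfold Spec_doc_cleaner; infer_instance

-- ===== CLAIM (what is proved, stated in full; the proofs are below) =====
def Claim_equal_doc_cleaner : Prop := ∀ (docList : List String), Dom_doc_cleaner docList → Spec_doc_cleaner docList (doc_cleaner docList)

-- ===== LEMMAS AND PROOFS =====

-- Python's translation of one article, as a per-character map/delete function: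
-- A reaches it by 34 replace passes, B by its two membership tests.
def tfun (c : Char) : Option Char :=
  if c ∈ breakSet then some ' '
  else if c ∈ dropSet then none
  else some c

-- str.replace(old, new) with a one-character old rewrites every character independently
theorem replace_go_single (c : Char) (new : List Char) :
    ∀ (l : List Char) (fuel : Nat) (acc : List Char), l.length ≤ fuel →
      PySem.Chars.replace.go [c] new fuel l acc
        = acc.reverse ++ l.flatMap (fun x => if x = c then new else [x]) := by
  intro l
  induction l with
  | nil => intro fuel acc _; cases fuel <;> simp [PySem.Chars.replace.go]
  | cons x t ih =>
    intro fuel acc hlen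
    cases fuel with
    | zero => simp at hlen
    | succ f =>
      rw [PySem.Chars.replace.go]
      by_cases hx : c = x
      · subst hx
        simp only [List.isPrefixOf, BEq.rfl, Bool.true_and, if_pos, List.length_cons,
          List.length_nil, Nat.zero_add, List.drop_succ_cons, List.drop_zero]
        rw [ih _ _ (by simpa using hlen)]
        simp
      · have : [c].isPrefixOf (x :: t) = false := by
          simp [List.isPrefixOf, hx]
        rw [this]
        simp only [Bool.false_eq_true, if_false]
        rw [ih _ _ (by simpa using hlen)]
        simp [Ne.symm hx]

theorem replace_single (s : List Char) (c : Char) (new : List Char) :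
    PySem.Chars.replace s [c] new = s.flatMap (fun x => if x = c then new else [x]) := by
  unfold PySem.Chars.replace
  simp [replace_go_single c new s s.length [] le_rfl]

-- a fold of single-character string replaces, pushed down to character lists
theorem foldl_replace_toList (L : List Char) (new : String) :
    ∀ (s : String),
      (L.foldl (fun a j => PySem.Str.replace a (String.singleton j) new) s).toList
        = L.foldl (fun a j => PySem.Chars.replace a [j] new.toList) s.toList := by
  induction L with
  | nil => intro s; rfl
  | cons c L ih =>
    intro s
    rw [List.foldl_cons, List.foldl_cons, ih]
    congr 1
    simp [PySem.Str.replace]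

-- folding the ' '-replacements over a list of characters = one map
theorem foldl_tospace (L : List Char) (hL : ' ' ∉ L) :
    ∀ (s : List Char),
      L.foldl (fun a c => a.flatMap (fun x => if x = c then [' '] else [x])) s
        = s.map (fun x => if x ∈ L then ' ' else x) := by
  induction L with
  | nil => intro s; simp
  | cons c L ih =>
    intro s
    have hL' : ' ' ∉ L := fun h => hL (List.mem_cons_of_mem _ h)
    rw [List.foldl_cons, ih hL']
    have : (s.flatMap (fun x => if x = c then [' '] else [x]))
        = s.map (fun x => if x = c then ' ' else x) := by
      induction s with
      | nil => rfl
      | cons y t iht => by_cases hy : y = c <;> simp [hy, iht]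
    rw [this, List.map_map]
    apply List.map_congr_left
    intro x _
    simp only [Function.comp]
    by_cases hx : x = c
    · simp [hx, hL']
    · simp [hx]

-- folding the deletions over a list of characters = one filter
theorem foldl_todel (L : List Char) :
    ∀ (s : List Char),
      L.foldl (fun a c => a.flatMap (fun x => if x = c then [] else [x])) s
        = s.filter (fun x => !decide (x ∈ L)) := by
  induction L with
  | nil => intro s; simp
  | cons c L ih =>
    intro s
    rw [List.foldl_cons, ih]
    have : (s.flatMap (fun x => if x = c then ([] : List Char) else [x]))
        = s.filter (fun x => !decide (x = c)) := by
      induction s with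
      | nil => rfl
      | cons y t iht => by_cases hy : y = c <;> simp [hy, iht]
    rw [this, List.filter_filter]
    apply List.filter_congr
    intro x _
    by_cases hx : x = c <;> simp [hx]

theorem lowerChar_ne (c d : Char) (hd : d.toNat < 97 ∨ 122 < d.toNat) (h : c ≠ d) :
    PySem.Chars.lowerChar c ≠ d := by
  unfold PySem.Chars.lowerChar PySem.Chars.isupper
  split
  · rename_i hu
    simp only [decide_eq_true_eq, Bool.and_eq_true] at hu
    have h1 : 65 ≤ c.toNat := hu.1
    have h2 : c.toNat ≤ 90 := hu.2
    intro he
    have hv : Nat.isValidChar (c.toNat + 32) := Or.inl (by omega)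
    have ht : (Char.ofNat (c.toNat + 32)).toNat = c.toNat + 32 := by
      rw [Char.toNat_ofNat]; simp [hv]
    rw [he] at ht
    omega
  · exact h

-- A's whole character pipeline equals one translate pass (tfun) followed by lower
theorem chain_eq (cs : List Char) :
    ((((cs.map (fun x => if x ∈ spaceChars then ' ' else x)).filter
        (fun x => !decide (x ∈ dropChars))).map PySem.Chars.lowerChar).flatMap
        (fun x => if x = '\n' then [' '] else [x])).flatMap
        (fun x => if x = '\t' then [] else [x])
      = PySem.Chars.lower (cs.filterMap tfun) := by
  induction cs with
  | nil => rfl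
  | cons c t ih =>
    simp only [List.map_cons]
    by_cases h1 : c ∈ spaceChars
    · rw [if_pos h1, List.filterMap_cons_some
        (show tfun c = some ' ' from by
          simp [tfun, show c ∈ breakSet from List.mem_append_left _ h1])]
      simp [show (' ' ∈ dropChars) = False from by simp [dropChars],
        PySem.Chars.lower, ih, show PySem.Chars.lowerChar ' ' = ' ' from rfl]
    · by_cases h2 : c = '\n'
      · subst h2
        rw [if_neg h1, List.filterMap_cons_some
          (show tfun '\n' = some ' ' from by decide)]
        simp [show ('\n' ∈ dropChars) = False from by simp [dropChars],
          PySem.Chars.lower, ih, show PySem.Chars.lowerChar '\n' = '\n' from rfl,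
          show PySem.Chars.lowerChar ' ' = ' ' from rfl]
      · have hb : c ∉ breakSet := by
          intro hm
          have hm' : c ∈ spaceChars ++ ['\n'] := hm
          rcases List.mem_append.mp hm' with h | h
          · exact h1 h
          · exact h2 (List.mem_singleton.mp h)
        by_cases h3 : c ∈ dropChars
        · rw [if_neg h1, List.filterMap_cons_none
            (show tfun c = none from by
              simp [tfun, hb, show c ∈ dropSet from List.mem_append_left _ h3])]
          simp [h3, ih]
        · by_cases h4 : c = '\t'
          · subst h4
            rw [if_neg h1, List.filterMap_cons_none
              (show tfun '\t' = none from by decide)]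
            simp [show ('\t' ∈ dropChars) = False from by simp [dropChars],
              PySem.Chars.lower, ih, show PySem.Chars.lowerChar '\t' = '\t' from rfl]
          · have hd : c ∉ dropSet := by
              intro hm
              have hm' : c ∈ dropChars ++ ['\t'] := hm
              rcases List.mem_append.mp hm' with h | h
              · exact h3 h
              · exact h4 (List.mem_singleton.mp h)
            rw [if_neg h1, List.filterMap_cons_some
              (show tfun c = some c from by simp [tfun, hb, hd])]
            have hn : PySem.Chars.lowerChar c ≠ '\n' := lowerChar_ne c '\n' (by decide) h2
            have htb : PySem.Chars.lowerChar c ≠ '\t' := lowerChar_ne c '\t' (by decide) h4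
            simp [h3, hn, htb, PySem.Chars.lower, ih]

-- lowering commutes with the translation table: specials are fixed by lower,
-- and lower never produces a special character
theorem mem_of_lower_mem (c : Char) (L : List Char)
    (hL : ∀ d ∈ L, d.toNat < 97 ∨ 122 < d.toNat)
    (hm : PySem.Chars.lowerChar c ∈ L) : c ∈ L := by
  by_cases hc : c ∈ L
  · exact hc
  · exact absurd rfl (lowerChar_ne c _ (hL _ hm) (fun he => hc (he ▸ hm)))

theorem break_bounds : ∀ d ∈ breakSet, d.toNat < 97 ∨ 122 < d.toNat := by
  intro d hd; fin_cases hd <;> decide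

theorem drop_bounds : ∀ d ∈ dropSet, d.toNat < 97 ∨ 122 < d.toNat := by
  intro d hd; fin_cases hd <;> decide

theorem tfun_lower (c : Char) :
    tfun (PySem.Chars.lowerChar c) = (tfun c).map PySem.Chars.lowerChar := by
  by_cases hs : c ∈ breakSet
  · have hfix : PySem.Chars.lowerChar c = c := by fin_cases hs <;> rfl
    rw [hfix]
    simp [tfun, hs, show PySem.Chars.lowerChar ' ' = ' ' from rfl]
  · by_cases hd : c ∈ dropSet
    · have hfix : PySem.Chars.lowerChar c = c := by fin_cases hd <;> rfl
      rw [hfix]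
      simp [tfun, hs, hd]
    · have hs' : PySem.Chars.lowerChar c ∉ breakSet :=
        fun hm => hs (mem_of_lower_mem c _ break_bounds hm)
      have hd' : PySem.Chars.lowerChar c ∉ dropSet :=
        fun hm => hd (mem_of_lower_mem c _ drop_bounds hm)
      simp [tfun, hs, hd, hs', hd']

theorem filterMap_tfun_lower (cs : List Char) :
    (PySem.Chars.lower cs).filterMap tfun = PySem.Chars.lower (cs.filterMap tfun) := by
  unfold PySem.Chars.lower
  rw [List.filterMap_map, List.map_filterMap]
  apply List.filterMap_congr
  intro c _
  simpa using tfun_lower c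

-- split₀.go's accumulator is a reversed prefix of the result
theorem split₀_go_acc (s : List Char) :
    ∀ (cur : List Char) (acc : List (List Char)),
      PySem.Chars.split₀.go s cur acc = acc.reverse ++ PySem.Chars.split₀.go s cur [] := by
  induction s with
  | nil =>
    intro cur acc
    rw [PySem.Chars.split₀.go, PySem.Chars.split₀.go]
    by_cases hc : cur.isEmpty <;> simp [hc]
  | cons c rest ih =>
    intro cur acc
    rw [PySem.Chars.split₀.go]
    conv_rhs => rw [PySem.Chars.split₀.go]
    by_cases hsp : PySem.Chars.isspace c
    · by_cases hc : cur.isEmpty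
      · simp only [hsp, hc, if_true]
        exact ih [] acc
      · simp only [hsp, hc, if_true, Bool.false_eq_true, if_false]
        rw [ih [] (cur.reverse :: acc), ih [] [cur.reverse]]
        simp
    · simp only [hsp, Bool.false_eq_true, if_false]
      exact ih (c :: cur) acc

-- one boundary character (break char or whitespace): flush the current word, continue
theorem boundary_step (c : Char) (rest cur : List Char) (words : List String) (d : Char)
    (hds : PySem.Chars.isspace d = true) (htf : tfun c = some d)
    (ih : ∀ (cur : List Char) (words : List String),
      cleanGo rest cur words
        = words ++ ((PySem.Chars.split₀.go (rest.filterMap tfun) cur.reverse []).filter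
            (fun w => keepWord (String.ofList w))).map String.ofList) :
    cleanGo rest [] (flushWord cur words)
      = words ++ ((PySem.Chars.split₀.go ((c :: rest).filterMap tfun) cur.reverse []).filter
          (fun w => keepWord (String.ofList w))).map String.ofList := by
  rw [ih, List.filterMap_cons_some htf]
  rw [PySem.Chars.split₀.go]
  simp only [hds, if_true]
  by_cases hc : cur = []
  · simp [hc, flushWord]
  · have hne : cur.reverse.isEmpty = false := by simp [hc]
    simp only [hne, Bool.false_eq_true, if_false, List.reverse_reverse]
    rw [split₀_go_acc _ [] [cur]]
    rw [flushWord, if_neg hc]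
    simp only [List.reverse_cons, List.reverse_nil, List.nil_append,
      List.filter_append, List.map_append]
    by_cases hk : keepWord (String.ofList cur) <;>
      simp [hk, List.filter, List.append_assoc]

-- B's one-pass loop = split₀-then-filter of the translated characters
theorem cleanGo_eq (t : List Char) :
    ∀ (cur : List Char) (words : List String),
      cleanGo t cur words
        = words ++ ((PySem.Chars.split₀.go (t.filterMap tfun) cur.reverse []).filter
            (fun w => keepWord (String.ofList w))).map String.ofList := by
  induction t with
  | nil =>
    intro cur words
    rw [cleanGo]
    simp only [List.filterMap_nil]
    rw [PySem.Chars.split₀.go]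
    by_cases hc : cur = []
    · simp [hc, flushWord]
    · have : cur.reverse.isEmpty = false := by
        simp [hc]
      simp only [this, Bool.false_eq_true, if_false, List.reverse_reverse]
      rw [flushWord, if_neg hc]
      by_cases hk : keepWord (String.ofList cur) <;> simp [hk]
  | cons c rest ih =>
    intro cur words
    rw [cleanGo]
    by_cases h1 : c ∈ dropSet
    · have h1' : c ∉ breakSet := by fin_cases h1 <;> decide
      simp only [h1, if_true]
      rw [ih, List.filterMap_cons_none (by simp [tfun, h1, h1'])]
    · by_cases h2 : c ∈ breakSet
      · have htf : tfun c = some ' ' := by simp [tfun, h2]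
        rw [if_neg h1, if_pos (by simp [h2])]
        exact boundary_step c rest cur words ' ' (by decide) htf ih
      · by_cases h3 : PySem.Chars.isspace c
        · have htf : tfun c = some c := by simp [tfun, h1, h2]
          rw [if_neg h1, if_pos (by simp [h3])]
          exact boundary_step c rest cur words c h3 htf ih
        · rw [if_neg h1, if_neg (by simp [h2, h3])]
          rw [ih, List.filterMap_cons_some (show tfun c = some c from by simp [tfun, h1, h2])]
          rw [PySem.Chars.split₀.go]
          simp only [h3, Bool.false_eq_true, if_false, List.reverse_append,
            List.reverse_cons, List.reverse_nil, List.nil_append, List.singleton_append]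

-- tokens produced by split() are nonempty and whitespace-free
def IsWord (w : List Char) : Prop := w ≠ [] ∧ ∀ ch ∈ w, PySem.Chars.isspace ch = false

theorem split₀_go_words :
    ∀ (s cur : List Char) (acc : List (List Char)),
      (∀ w ∈ acc, IsWord w) → (∀ ch ∈ cur, PySem.Chars.isspace ch = false) →
      ∀ w ∈ PySem.Chars.split₀.go s cur acc, IsWord w := by
  intro s
  induction s with
  | nil =>
    intro cur acc hacc hcur w hw
    rw [PySem.Chars.split₀.go] at hw
    split at hw
    · exact hacc w (List.mem_reverse.mp hw)
    · rename_i hne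
      rw [List.reverse_cons] at hw
      rcases List.mem_append.mp hw with h | h
      · exact hacc w (List.mem_reverse.mp h)
      · rw [List.mem_singleton.mp h]
        refine ⟨by simpa using hne, ?_⟩
        intro ch hch
        exact hcur ch (List.mem_reverse.mp hch)
  | cons c rest ih =>
    intro cur acc hacc hcur w hw
    rw [PySem.Chars.split₀.go] at hw
    split at hw
    · split at hw
      · exact ih [] acc hacc (by simp) w hw
      · rename_i hne
        refine ih [] _ ?_ (by simp) w hw
        intro v hv
        rcases List.mem_cons.mp hv with h | h
        · subst h
          exact ⟨by simpa using hne, fun ch hch => hcur ch (List.mem_reverse.mp hch)⟩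
        · exact hacc v h
    · rename_i hsp
      refine ih (c :: cur) acc hacc ?_ w hw
      intro ch hch
      rcases List.mem_cons.mp hch with h | h
      · subst h; simpa using hsp
      · exact hcur ch h

theorem mem_split₀_word (s w : List Char) (h : w ∈ PySem.Chars.split₀ s) : IsWord w :=
  split₀_go_words s [] [] (by simp) (by simp) w h

theorem split₀_go_word_append :
    ∀ (w : List Char), (∀ ch ∈ w, PySem.Chars.isspace ch = false) →
      ∀ (rest cur : List Char) (acc : List (List Char)),
        PySem.Chars.split₀.go (w ++ rest) cur acc = PySem.Chars.split₀.go rest (w.reverse ++ cur) acc := by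
  intro w
  induction w with
  | nil => intro _ rest cur acc; simp
  | cons c t ih =>
    intro hw rest cur acc
    rw [List.cons_append, PySem.Chars.split₀.go]
    have hc : PySem.Chars.isspace c = false := hw c (List.mem_cons_self ..)
    rw [hc]
    simp only [Bool.false_eq_true, if_false]
    rw [ih (fun ch hch => hw ch (List.mem_cons_of_mem _ hch)) rest (c :: cur) acc]
    congr 1
    simp

theorem split₀_go_join :
    ∀ (ws : List (List Char)) (acc : List (List Char)),
      (∀ w ∈ ws, IsWord w) → ws ≠ [] →
      PySem.Chars.split₀.go (PySem.Chars.join [' '] ws) [] acc = acc.reverse ++ ws := by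
  intro ws
  induction ws with
  | nil => intro acc _ h; exact absurd rfl h
  | cons w ws ih =>
    intro acc hws _
    have hw : IsWord w := hws w (List.mem_cons_self ..)
    cases ws with
    | nil =>
      rw [PySem.Chars.join_singleton]
      rw [show w = w ++ [] from (List.append_nil w).symm, split₀_go_word_append w hw.2]
      rw [PySem.Chars.split₀.go]
      rw [if_neg (by simpa using hw.1)]
      simp
    | cons w' ws' =>
      rw [PySem.Chars.join_cons_cons, List.append_assoc, split₀_go_word_append w hw.2]
      rw [List.singleton_append, PySem.Chars.split₀.go]
      rw [if_pos (by decide)]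
      rw [if_neg (by simpa using hw.1)]
      rw [List.append_nil, List.reverse_reverse]
      rw [ih (w :: acc) (fun v hv => hws v (List.mem_cons_of_mem _ hv)) (by simp)]
      simp

-- ' '.join(words).split() gives the words back
theorem split₀_join (ws : List (List Char)) (h : ∀ w ∈ ws, IsWord w) :
    PySem.Chars.split₀ (PySem.Chars.join [' '] ws) = ws := by
  cases ws with
  | nil => rfl
  | cons w ws => exact split₀_go_join (w :: ws) [] h (by simp)

-- one article through A's body = the same article through B's one-pass loop
theorem article_eq (article : String) :
    (let a := spaceChars.foldl (fun a j => PySem.Str.replace a (String.singleton j) " ") article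
     let a := dropChars.foldl (fun a j => PySem.Str.replace a (String.singleton j) "") a
     let a := PySem.Str.lower a
     let a := PySem.Str.replace a "\n" " "
     let a := PySem.Str.replace a "\t" ""
     let a := PySem.Str.join " "
       ((PySem.Str.split₀ a).filter (fun word => !(PySem.Set.contains commonEngWrds word)))
     PySem.Str.join " "
       ((PySem.Str.split₀ a).filter (fun word =>
         decide (1 < PySem.Str.len word) && !PySem.Str.strIsdigit word)))
    = PySem.Str.join " " (cleanGo (PySem.Chars.lower article.toList) [] []) := by
  have h5 : (PySem.Str.replace (PySem.Str.replace (PySem.Str.lower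
      (dropChars.foldl (fun a j => PySem.Str.replace a (String.singleton j) "")
        (spaceChars.foldl (fun a j => PySem.Str.replace a (String.singleton j) " ") article)))
      "\n" " ") "\t" "").toList
      = PySem.Chars.lower (article.toList.filterMap tfun) := by
    rw [PySem.Str.toList_replace, PySem.Str.toList_replace, PySem.Str.toList_lower]
    rw [foldl_replace_toList, foldl_replace_toList]
    simp only [show (" " : String).toList = [' '] from rfl,
      show ("" : String).toList = ([] : List Char) from rfl,
      show ("\n" : String).toList = ['\n'] from rfl,
      show ("\t" : String).toList = ['\t'] from rfl,
      replace_single]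
    rw [foldl_tospace spaceChars (by decide), foldl_todel dropChars]
    exact chain_eq article.toList
  rw [cleanGo_eq, List.nil_append, List.reverse_nil]
  rw [filterMap_tfun_lower]
  show PySem.Str.join " " _ = PySem.Str.join " " _
  simp only [PySem.Str.split₀, h5]
  simp only [List.filter_map, PySem.Str.join, String.toList_ofList, List.map_map,
    Function.comp_def, List.map_id']
  rw [show (" " : String).toList = [' '] from rfl]
  rw [split₀_join _ (fun w hw =>
    mem_split₀_word _ w (List.mem_of_mem_filter hw))]
  simp only [List.filter_filter]
  refine congrArg _ (congrArg _ ?_)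
  rw [show PySem.Chars.split₀.go (PySem.Chars.lower (article.toList.filterMap tfun)) [] []
      = PySem.Chars.split₀ (PySem.Chars.lower (article.toList.filterMap tfun)) from rfl]
  apply List.filter_congr
  intro w _
  unfold keepWord
  exact Bool.and_comm _ _

-- ===== VERDICT (by name: the statement is the Claim_ definition above) =====
theorem doc_cleaner_spec : Claim_equal_doc_cleaner := by
  intro docList _
  unfold Spec_doc_cleaner doc_cleaner doc_cleaner_alt
  rw [PySem.List.foldl_append_singleton_eq_map, List.nil_append]
  have hr := PySem.List.map_pyGetD_pyRange_zero docList ""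
  conv_rhs => rw [← hr]
  rw [List.map_map]
  exact List.map_congr_left (fun i _ => article_eq _)
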